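-- pv_equiv track=rewrite | github.com/hihi-hehe/coding_test_with_python | Q1.py | solution
-- ===== SOURCE A (Python) =====
-- def solution(N, fearLevel):
--     answer = 0
--     nGroup={}
--     for n in fearLevel:
--         nGroup[n]=(nGroup.get(n, 0)) + 1
--     for key,_ in nGroup.items():
--         nGroup[key]=(nGroup.get(key)) // key
--         answer=answer+nGroup[key]
--     return answer
-- ===== SOURCE B (Python) =====
-- def solution(N, fearLevel):
--     total = 0
--     run_val = None
--     run_len = 0
--     for x in sorted(fearLevel):
--         if run_len and x == run_val:
--             run_len += 1
--         else:
--             if run_len: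
--                 total += run_len // run_val
--             run_val = x
--             run_len = 1
--     if run_len:
--         total += run_len // run_val
--     return total
-- ===== Notes on version B (the rewrite author's own statement) =====
-- stated objective: alternative
-- what changed: Replaces A's dict-based counting pass plus a second pass over the dict's items by a single run-length scan over the sorted list, adding run_length // value at each run boundary.
import Mathlib
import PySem

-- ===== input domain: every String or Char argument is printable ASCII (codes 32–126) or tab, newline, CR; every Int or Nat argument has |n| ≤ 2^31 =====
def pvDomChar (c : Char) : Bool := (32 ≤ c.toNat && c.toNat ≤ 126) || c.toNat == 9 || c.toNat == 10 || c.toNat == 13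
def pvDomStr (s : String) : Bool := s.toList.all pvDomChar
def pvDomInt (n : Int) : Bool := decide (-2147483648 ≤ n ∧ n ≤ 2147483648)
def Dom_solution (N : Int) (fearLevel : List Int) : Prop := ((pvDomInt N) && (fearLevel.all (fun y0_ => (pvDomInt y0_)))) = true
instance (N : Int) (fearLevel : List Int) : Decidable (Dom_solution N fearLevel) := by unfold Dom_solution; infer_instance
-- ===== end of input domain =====

-- B replaces A's dict-counting double pass by one run-length scan over the sorted list (alternative algorithm, not claimed faster).

-- ===== PORT A =====
def solution (N : Int) (fearLevel : List Int) : Int :=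
  let nGroup : PySem.Dict Int Int :=
    fearLevel.foldl (fun d n => d.insert n (d.getD n 0 + 1)) PySem.Dict.empty
  let st :=
    nGroup.items.foldl
      (fun (st : Int × PySem.Dict Int Int) kv =>
        let d' := st.2.insert kv.1 (PySem.Int.floordiv (st.2.getD kv.1 0) kv.1)
        (st.1 + d'.getD kv.1 0, d'))
      ((0 : Int), nGroup)
  st.1

-- ===== PORT B =====
-- state = (total, run_val, run_len); run_len = 0 encodes Python's "no run yet" (run_val None)
def bStep (st : Int × Int × Int) (x : Int) : Int × Int × Int :=
  if st.2.2 != 0 && x == st.2.1 then (st.1, st.2.1, st.2.2 + 1)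
  else ((if st.2.2 != 0 then st.1 + PySem.Int.floordiv st.2.2 st.2.1 else st.1), x, 1)

def bFlush (st : Int × Int × Int) : Int :=
  if st.2.2 != 0 then st.1 + PySem.Int.floordiv st.2.2 st.2.1 else st.1

def solution_alt (N : Int) (fearLevel : List Int) : Int :=
  bFlush ((PySem.List.sorted fearLevel (fun x => x) false).foldl bStep (0, 0, 0))

-- ===== PRECONDITION & SPEC =====
-- Pre_ excludes exactly the inputs with a 0 fear level, on which Python A (and B) raises ZeroDivisionError.
def Pre_solution (N : Int) (fearLevel : List Int) : Prop := (0 : Int) ∉ fearLevel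
instance (N : Int) (fearLevel : List Int) : Decidable (Pre_solution N fearLevel) := by unfold Pre_solution; infer_instance
def pvWitness_solution : Int × List Int := (3, [1, 2, 2, -3])

def Spec_solution (N : Int) (fearLevel : List Int) (out : Int) : Prop := out = solution_alt N fearLevel
instance (N : Int) (fearLevel : List Int) (out : Int) : Decidable (Spec_solution N fearLevel out) := by unfold Spec_solution; infer_instance

-- ===== CLAIM (what is proved, stated in full; the proofs are below) =====
def Claim_equal_solution : Prop := ∀ (N : Int) (fearLevel : List Int), Dom_solution N fearLevel → Pre_solution N fearLevel → Spec_solution N fearLevel (solution N fearLevel)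

-- ===== LEMMAS AND PROOFS =====

-- the common value both programs compute: sum over the distinct values of count // value
def groupSum (s : List Int) : Int :=
  ((PySem.Set.ofList s).map (fun k => PySem.Int.floordiv (s.count k : Int) k)).sum

-- A's second loop over the counter's items: the insert at the current key never affects later keys
lemma loopA (l : List (Int × Int)) (d : PySem.Dict Int Int) (a : Int)
    (hnd : (l.map Prod.fst).Nodup)
    (hval : ∀ p ∈ l, d.getD p.1 0 = p.2) :
    (l.foldl
      (fun (st : Int × PySem.Dict Int Int) kv =>
        let d' := st.2.insert kv.1 (PySem.Int.floordiv (st.2.getD kv.1 0) kv.1)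
        (st.1 + d'.getD kv.1 0, d')) (a, d)).1
      = a + (l.map (fun p => PySem.Int.floordiv p.2 p.1)).sum := by
  induction l generalizing a d with
  | nil => simp
  | cons p t ih =>
    simp only [List.foldl_cons, List.map_cons, List.nodup_cons] at *
    rw [PySem.Dict.getD_insert_self, hval p (by simp)]
    rw [ih _ _ hnd.2 ?_]
    · simp [add_assoc]
    · intro q hq
      have hne : q.1 ≠ p.1 := by
        intro h; exact hnd.1 (h ▸ List.mem_map_of_mem hq)
      rw [PySem.Dict.getD_insert_of_ne _ _ _ hne, hval q (by simp [hq])]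

lemma solution_eq (N : Int) (fl : List Int) : solution N fl = groupSum fl := by
  unfold solution groupSum
  rw [PySem.Dict.foldl_insert_getD_add_one_eq_counter]
  rw [loopA _ _ _ ?hnd ?hval]
  case hnd =>
    rw [PySem.Dict.items_counter, List.map_map,
      show (Prod.fst ∘ fun k : Int => (k, ((List.count k fl : Nat) : Int))) = id from rfl,
      List.map_id]
    exact PySem.Set.nodup_ofList fl
  case hval =>
    intro p hp
    rw [PySem.Dict.items_counter] at hp
    obtain ⟨k, _, rfl⟩ := List.mem_map.1 hp
    exact PySem.Dict.getD_counter fl k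
  rw [PySem.Dict.items_counter, List.map_map, zero_add]
  rfl

-- B: folding over a run of the current value only lengthens the run
lemma foldB_replicate (c : Nat) (T x : Int) : ∀ L : Int, 0 < L →
    (List.replicate c x).foldl bStep (T, x, L) = (T, x, L + c) := by
  induction c with
  | zero => simp
  | succ n ih =>
    intro L hL
    rw [List.replicate_succ, List.foldl_cons]
    have hstep : bStep (T, x, L) x = (T, x, L + 1) := by
      simp [bStep]
      exact fun h => absurd h (by omega)
    rw [hstep, ih (L + 1) (by omega)]
    rw [Prod.mk.injEq, Prod.mk.injEq]
    refine ⟨rfl, rfl, ?_⟩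
    push_cast
    ring

-- set-building helpers for the run decomposition
lemma foldl_add_skip (c : Nat) (x : Int) : ∀ s : List Int, x ∈ s →
    (List.replicate c x).foldl PySem.Set.add s = s := by
  induction c with
  | zero => simp
  | succ n ih =>
    intro s hs
    rw [List.replicate_succ, List.foldl_cons]
    have : PySem.Set.add s x = s := by
      simp [PySem.Set.add, PySem.Set.contains, hs]
    rw [this]; exact ih s hs

lemma foldl_add_cons (l : List Int) (x : Int) (hx : x ∉ l) : ∀ s : List Int,
    l.foldl PySem.Set.add (x :: s) = x :: l.foldl PySem.Set.add s := by
  induction l with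
  | nil => simp
  | cons y t ih =>
    intro s
    have hyx : y ≠ x := fun h => hx (h ▸ List.mem_cons_self)
    have hxt : x ∉ t := fun h => hx (List.mem_cons_of_mem _ h)
    have hby : (y == x) = false := by simp [hyx]
    have : PySem.Set.add (x :: s) y = x :: PySem.Set.add s y := by
      simp only [PySem.Set.add, PySem.Set.contains, List.contains_cons, hby, Bool.false_or]
      split <;> simp
    rw [List.foldl_cons, this, List.foldl_cons, ih hxt]

-- main loop invariant for B, over any ≤-sorted list
lemma dropWhile_lt (x : Int) : ∀ t : List Int, List.Pairwise (· ≤ ·) t → (∀ y ∈ t, x ≤ y) →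
    ∀ y ∈ t.dropWhile (fun y => y == x), x < y := by
  intro t
  induction t with
  | nil => simp
  | cons a r ih =>
    intro hsort hle y hy
    by_cases hax : a = x
    · rw [List.dropWhile_cons_of_pos (by simp [hax])] at hy
      exact ih (List.pairwise_cons.1 hsort).2 (fun z hz => hle z (List.mem_cons_of_mem _ hz)) y hy
    · rw [List.dropWhile_cons_of_neg (by simp [hax])] at hy
      have hxa : x < a := lt_of_le_of_ne (hle a List.mem_cons_self) (fun h => hax h.symm)
      rcases List.mem_cons.1 hy with rfl | hy'
      · exact hxa
      · exact lt_of_lt_of_le hxa ((List.pairwise_cons.1 hsort).1 y hy')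

lemma loopB : ∀ (n : Nat) (s : List Int), s.length ≤ n → List.Pairwise (· ≤ ·) s →
    ∀ T v L : Int, (L ≠ 0 → ∀ y ∈ s, v < y) → 0 ≤ L →
    bFlush (s.foldl bStep (T, v, L)) = bFlush (T, v, L) + groupSum s := by
  intro n
  induction n with
  | zero =>
    intro s hs _ T v L _ _
    rw [List.length_eq_zero_iff.mp (Nat.le_zero.mp hs)]
    simp [groupSum, PySem.Set.ofList]
  | succ n ih =>
    intro s hs hsort T v L hlt hL0
    match s with
    | [] => simp [groupSum, PySem.Set.ofList]
    | x :: t =>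
      have hstep : bStep (T, v, L) x = (bFlush (T, v, L), x, 1) := by
        by_cases hL : L = 0
        · simp [bStep, bFlush, hL]
        · have hvx : v < x := hlt hL x List.mem_cons_self
          have hxv : (x == v) = false := by simp; omega
          simp [bStep, bFlush, hL, hxv]
      have htsort : List.Pairwise (· ≤ ·) t := (List.pairwise_cons.1 hsort).2
      have hxle : ∀ y ∈ t, x ≤ y := (List.pairwise_cons.1 hsort).1
      have hsplit : t = t.takeWhile (fun y => y == x) ++ t.dropWhile (fun y => y == x) :=
        (List.takeWhile_append_dropWhile).symm
      have ht1rep : t.takeWhile (fun y => y == x)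
          = List.replicate (t.takeWhile (fun y => y == x)).length x :=
        List.eq_replicate_of_mem (fun b hb => by
          have := List.mem_takeWhile_imp hb; simpa using this)
      have ht2lt : ∀ y ∈ t.dropWhile (fun y => y == x), x < y := dropWhile_lt x t htsort hxle
      have ht2sort : List.Pairwise (· ≤ ·) (t.dropWhile (fun y => y == x)) :=
        List.Pairwise.sublist (List.dropWhile_sublist _) htsort
      have hxnot2 : x ∉ t.dropWhile (fun y => y == x) := fun h => by
        have := ht2lt x h; omega
      have hlen : (t.dropWhile (fun y => y == x)).length ≤ n := by
        have h1 : (t.dropWhile (fun y => y == x)).length ≤ t.length :=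
          (List.dropWhile_sublist _).length_le
        have h2 : t.length ≤ n := by simpa using hs
        omega
      have hcount20 : (t.dropWhile (fun y => y == x)).count x = 0 :=
        List.count_eq_zero.2 hxnot2
      rw [List.foldl_cons, hstep]
      conv_lhs => rw [hsplit]
      rw [List.foldl_append]
      conv_lhs => rw [ht1rep]
      rw [foldB_replicate _ _ _ 1 (by omega)]
      rw [ih _ hlen ht2sort _ x _ (fun _ => ht2lt) (by positivity)]
      have hflush : bFlush (bFlush (T, v, L), x,
          1 + ((t.takeWhile (fun y => y == x)).length : Int)) =
          bFlush (T, v, L)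
            + PySem.Int.floordiv (1 + ((t.takeWhile (fun y => y == x)).length : Int)) x := by
        have hc : ((1 + ((t.takeWhile (fun y => y == x)).length : Int)) != 0) = true := by
          simp; omega
        simp [bFlush, hc]
      rw [hflush]
      -- the distinct values of x :: t are x followed by those of the strict tail
      have hset : PySem.Set.ofList (x :: t) = x :: PySem.Set.ofList (t.dropWhile (fun y => y == x)) := by
        show ((x :: t).foldl PySem.Set.add []) = _
        conv_lhs => rw [hsplit]
        rw [List.foldl_cons, List.foldl_append]
        have hadd0 : PySem.Set.add [] x = [x] := by simp [PySem.Set.add, PySem.Set.contains]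
        rw [hadd0]
        conv_lhs => rw [ht1rep]
        rw [foldl_add_skip _ _ _ (by simp), foldl_add_cons _ _ hxnot2]
        rfl
      have hcountx : (((x :: t).count x : Nat) : Int)
          = 1 + ((t.takeWhile (fun y => y == x)).length : Int) := by
        rw [List.count_cons_self]
        conv_lhs => rw [hsplit]
        rw [List.count_append]
        conv_lhs => rw [ht1rep]
        rw [List.count_replicate_self, hcount20]
        push_cast; ring
      have hcountk : ∀ k ∈ PySem.Set.ofList (t.dropWhile (fun y => y == x)),
          (x :: t).count k = (t.dropWhile (fun y => y == x)).count k := by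
        intro k hk
        have hkt2 : k ∈ t.dropWhile (fun y => y == x) := (PySem.Set.mem_ofList _ _).1 hk
        have hkx : k ≠ x := fun h => hxnot2 (h ▸ hkt2)
        rw [List.count_cons_of_ne (Ne.symm hkx)]
        conv_lhs => rw [hsplit]
        rw [List.count_append]
        conv_lhs => rw [ht1rep]
        rw [List.count_replicate, if_neg (by simpa using Ne.symm hkx)]
        omega
      unfold groupSum
      rw [hset, List.map_cons, List.sum_cons, hcountx]
      have hmapeq : (PySem.Set.ofList (t.dropWhile (fun y => y == x))).map
            (fun k => PySem.Int.floordiv (((x :: t).count k : Nat) : Int) k)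
          = (PySem.Set.ofList (t.dropWhile (fun y => y == x))).map
            (fun k => PySem.Int.floordiv (((t.dropWhile (fun y => y == x)).count k : Nat) : Int) k) :=
        List.map_congr_left (fun k hk => by rw [hcountk k hk])
      rw [hmapeq]
      ring

lemma solution_alt_eq (N : Int) (fl : List Int) :
    solution_alt N fl = groupSum (PySem.List.sorted fl (fun x => x) false) := by
  unfold solution_alt
  have h := loopB (PySem.List.sorted fl (fun x => x) false).length
    (PySem.List.sorted fl (fun x => x) false) le_rfl
    (PySem.List.sorted_pairwise fl (fun x => x)) 0 0 0 (by intro h; omega) le_rfl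
  rw [h]; simp [bFlush]

lemma groupSum_sorted (fl : List Int) :
    groupSum (PySem.List.sorted fl (fun x => x) false) = groupSum fl := by
  unfold groupSum
  have hperm : (PySem.List.sorted fl (fun x => x) false).Perm fl :=
    PySem.List.sorted_perm fl (fun x => x) false
  have hpermset : (PySem.Set.ofList (PySem.List.sorted fl (fun x => x) false)).Perm
      (PySem.Set.ofList fl) :=
    (List.perm_ext_iff_of_nodup (PySem.Set.nodup_ofList _) (PySem.Set.nodup_ofList _)).2
      (fun a => by simp [PySem.Set.mem_ofList, hperm.mem_iff])
  have hcount : ∀ k : Int, (PySem.List.sorted fl (fun x => x) false).count k = fl.count k :=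
    fun k => hperm.count_eq k
  calc ((PySem.Set.ofList (PySem.List.sorted fl (fun x => x) false)).map
        (fun k => PySem.Int.floordiv (((PySem.List.sorted fl (fun x => x) false).count k : Nat) : Int) k)).sum
      = ((PySem.Set.ofList (PySem.List.sorted fl (fun x => x) false)).map
        (fun k => PySem.Int.floordiv ((fl.count k : Nat) : Int) k)).sum := by
        congr 1; exact List.map_congr_left (fun k _ => by rw [hcount k])
    _ = ((PySem.Set.ofList fl).map (fun k => PySem.Int.floordiv ((fl.count k : Nat) : Int) k)).sum :=
        (hpermset.map _).sum_eq

-- ===== VERDICT (by name: the statement is the Claim_ definition above) =====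
theorem solution_spec : Claim_equal_solution := by
  intro N fl _ _
  unfold Spec_solution
  rw [solution_eq, solution_alt_eq, groupSum_sorted]
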